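-- pv_equiv track=rewrite | github.com/aditya-raj9125/Sanskrit-Env | training/train_grpo.py | match_to_option
-- ===== SOURCE A (Python) =====
-- from typing import Any, Dict, List, Optional, Union
--
-- def match_to_option(raw: str, options: List[str]) -> str:
--     text = (raw or "").strip()
--     if not options:
--         return text
--     for opt in options:
--         if text == opt:
--             return opt
--     lowered = text.lower()
--     for opt in options:
--         if opt.lower() == lowered:
--             return opt
--     for opt in options:
--         if opt.lower().startswith(lowered[:30]) and lowered:
--             return opt
--     for opt in options:
--         if opt.lower() in lowered or lowered in opt.lower():
--             return opt
--     return options[0]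
-- ===== SOURCE B (Python) =====
-- def match_to_option(raw, options):
--     text = (raw or "").strip()
--     if not options:
--         return text
--     lowered = text.lower()
--     prefix = lowered[:30]
--     best_tier = 5
--     best_opt = None
--     for opt in options:
--         if text == opt:
--             return opt
--         lo = opt.lower()
--         if best_tier > 2 and lo == lowered:
--             best_tier, best_opt = 2, opt
--         elif best_tier > 3 and lowered and lo.startswith(prefix):
--             best_tier, best_opt = 3, opt
--         elif best_tier > 4 and (lo in lowered or lowered in lo):
--             best_tier, best_opt = 4, opt
--     return best_opt if best_opt is not None else options[0]
-- ===== Notes on version B (the rewrite author's own statement) =====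
-- stated objective: alternative
-- what changed: Replaces A's four sequential scans over the options with a single pass that returns immediately on an exact match and otherwise tracks the (tier, option) pair with the smallest matching tier (2 case-insensitive, 3 prefix, 4 substring), testing a tier only when it would beat the current best and keeping the first option on ties.
import Mathlib
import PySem

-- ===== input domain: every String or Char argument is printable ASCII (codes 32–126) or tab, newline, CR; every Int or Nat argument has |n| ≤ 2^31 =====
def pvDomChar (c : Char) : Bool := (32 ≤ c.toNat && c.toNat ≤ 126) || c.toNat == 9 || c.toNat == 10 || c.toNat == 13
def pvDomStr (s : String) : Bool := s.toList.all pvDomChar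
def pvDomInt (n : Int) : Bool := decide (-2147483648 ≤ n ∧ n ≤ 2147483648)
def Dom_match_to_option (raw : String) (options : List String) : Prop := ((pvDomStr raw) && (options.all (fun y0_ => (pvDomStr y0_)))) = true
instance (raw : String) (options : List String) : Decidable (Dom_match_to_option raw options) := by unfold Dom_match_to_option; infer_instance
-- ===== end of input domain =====

-- B replaces A's four sequential scans with a single pass that returns on an exact match
-- and otherwise keeps the first option with the smallest matching tier (2-4); alternative decomposition, same results.

-- ===== PORT A =====
def match_to_option (raw : String) (options : List String) : String :=
  let text := PySem.Str.strip (if raw == "" then "" else raw)   -- (raw or "").strip()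
  if options.isEmpty then text
  else
    match options.find? (fun opt => text == opt) with
    | some o => o
    | none =>
      let lowered := PySem.Str.lower text
      match options.find? (fun opt => PySem.Str.lower opt == lowered) with
      | some o => o
      | none =>
        match options.find? (fun opt =>
            PySem.Str.startswith (PySem.Str.lower opt) (PySem.Str.slice lowered none (some 30)) && !(lowered == "")) with
        | some o => o
        | none =>
          match options.find? (fun opt =>
              PySem.Str.isIn (PySem.Str.lower opt) lowered || PySem.Str.isIn lowered (PySem.Str.lower opt)) with
          | some o => o
          | none => options.headD ""

-- ===== PORT B =====
-- tier of the current best candidate: 5 = nothing found yet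
def pvBestTier (b : Option (Nat × String)) : Nat :=
  match b with
  | none => 5
  | some (t, _) => t

-- one pass: return immediately on an exact match, otherwise track (tier, option)
-- of the best-so-far, testing a tier only when it would beat the current best
def pvScan (text lowered pfx : String) (best : Option (Nat × String)) :
    List String → Option String
  | [] =>
    match best with
    | none => none
    | some (_, o) => some o
  | opt :: rest =>
    if text == opt then some opt
    else
      let lo := PySem.Str.lower opt
      let best' :=
        if decide (2 < pvBestTier best) && (lo == lowered) then some (2, opt)
        else if decide (3 < pvBestTier best) && (!(lowered == "") && PySem.Str.startswith lo pfx) then some (3, opt)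
        else if decide (4 < pvBestTier best) && (PySem.Str.isIn lo lowered || PySem.Str.isIn lowered lo) then some (4, opt)
        else best
      pvScan text lowered pfx best' rest

def match_to_option_alt (raw : String) (options : List String) : String :=
  let text := PySem.Str.strip (if raw == "" then "" else raw)
  if options.isEmpty then text
  else
    let lowered := PySem.Str.lower text
    let pfx := PySem.Str.slice lowered none (some 30)
    match pvScan text lowered pfx none options with
    | some o => o
    | none => options.headD ""

-- ===== PRECONDITION & SPEC =====
def Spec_match_to_option (raw : String) (options : List String) (out : String) : Prop := out = match_to_option_alt raw options
instance (raw : String) (options : List String) (out : String) : Decidable (Spec_match_to_option raw options out) := by unfold Spec_match_to_option; infer_instance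

-- ===== CLAIM (what is proved, stated in full; the proofs are below) =====
def Claim_equal_match_to_option : Prop := ∀ (raw : String) (options : List String), Dom_match_to_option raw options → Spec_match_to_option raw options (match_to_option raw options)

-- ===== LEMMAS AND PROOFS =====

theorem find?_congr_mem {α : Type} (p q : α → Bool) (l : List α)
    (h : ∀ x ∈ l, p x = q x) : l.find? p = l.find? q := by
  induction l with
  | nil => rfl
  | cons a t ih =>
    simp only [List.find?]
    rw [h a (by simp)]
    cases q a
    · exact ih (fun x hx => h x (by simp [hx]))
    · rfl

-- an exact match anywhere makes pvScan return it, whatever the accumulator holds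
theorem pvScan_exact (text lowered pfx : String) (l : List String) (o : String)
    (hfind : l.find? (fun x => text == x) = some o) (best : Option (Nat × String)) :
    pvScan text lowered pfx best l = some o := by
  induction l generalizing best with
  | nil => simp at hfind
  | cons a tl ih =>
    simp only [List.find?] at hfind
    cases ha : (text == a) with
    | true =>
      rw [ha] at hfind
      simp only [Option.some.injEq] at hfind
      simp only [pvScan, ha, if_pos]
      exact congrArg some hfind
    | false =>
      rw [ha] at hfind
      simp only [pvScan, ha, Bool.false_eq_true, if_false]
      exact ih hfind _

-- once the best tier can no longer be beaten on the rest of the list, it is returned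
theorem pvScan_keep (text lowered pfx : String) (l : List String) (k : Nat) (o : String)
    (h1 : ∀ x ∈ l, (text == x) = false)
    (h2 : ∀ x ∈ l, 2 < k → (PySem.Str.lower x == lowered) = false)
    (h3 : ∀ x ∈ l, 3 < k → (!(lowered == "") && PySem.Str.startswith (PySem.Str.lower x) pfx) = false)
    (hk : k ≤ 4) :
    pvScan text lowered pfx (some (k, o)) l = some o := by
  induction l with
  | nil => rfl
  | cons a tl ih =>
    simp only [pvScan, h1 a (by simp), Bool.false_eq_true, if_false]
    have hbest : (if decide (2 < pvBestTier (some (k, o))) && (PySem.Str.lower a == lowered) then some (2, a)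
        else if decide (3 < pvBestTier (some (k, o))) && (!(lowered == "") && PySem.Str.startswith (PySem.Str.lower a) pfx) then some (3, a)
        else if decide (4 < pvBestTier (some (k, o))) && (PySem.Str.isIn (PySem.Str.lower a) lowered || PySem.Str.isIn lowered (PySem.Str.lower a)) then some (4, a)
        else some (k, o)) = some (k, o) := by
      simp only [pvBestTier]
      have hk4 : ¬ (4 < k) := by omega
      by_cases hk2 : 2 < k
      · rw [h2 a (by simp) hk2]
        by_cases hk3 : 3 < k
        · rw [h3 a (by simp) hk3]
          simp [hk4]
        · simp [hk3, hk4]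
      · have hk3' : ¬ (3 < k) := by omega
        simp [hk2, hk3', hk4]
    rw [hbest]
    exact ih (fun x hx => h1 x (by simp [hx])) (fun x hx => h2 x (by simp [hx]))
      (fun x hx => h3 x (by simp [hx]))

-- the first option matching tier 2 wins when no exact match exists
theorem pvScan_two (text lowered pfx : String) (l : List String) (o : String)
    (h1 : ∀ x ∈ l, (text == x) = false)
    (hfind : l.find? (fun x => PySem.Str.lower x == lowered) = some o)
    (best : Option (Nat × String)) (hbest : 2 < pvBestTier best) :
    pvScan text lowered pfx best l = some o := by
  induction l generalizing best with
  | nil => simp at hfind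
  | cons a tl ih =>
    simp only [List.find?] at hfind
    have ha1 := h1 a (by simp)
    simp only [pvScan, ha1, Bool.false_eq_true, if_false]
    cases ha : (PySem.Str.lower a == lowered) with
    | true =>
      rw [ha] at hfind
      simp only [Option.some.injEq] at hfind
      subst hfind
      rw [if_pos (by simp [hbest])]
      exact pvScan_keep text lowered pfx tl 2 a
        (fun x hx => h1 x (by simp [hx])) (fun x _ h => by omega) (fun x _ h => by omega)
        (by omega)
    | false =>
      rw [ha] at hfind
      rw [if_neg (by simp)]
      apply ih (fun x hx => h1 x (by simp [hx])) hfind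
      split_ifs <;> first | exact hbest | simp [pvBestTier]
-- (the non-updating branch keeps best, whose tier is already > 2)

-- the first option matching tier 3 wins when no tier-1/2 match exists
theorem pvScan_three (text lowered pfx : String) (l : List String) (o : String)
    (h1 : ∀ x ∈ l, (text == x) = false)
    (h2 : ∀ x ∈ l, (PySem.Str.lower x == lowered) = false)
    (hfind : l.find? (fun x => !(lowered == "") && PySem.Str.startswith (PySem.Str.lower x) pfx) = some o)
    (best : Option (Nat × String)) (hbest : 3 < pvBestTier best) :
    pvScan text lowered pfx best l = some o := by
  induction l generalizing best with
  | nil => simp at hfind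
  | cons a tl ih =>
    simp only [List.find?] at hfind
    have ha1 := h1 a (by simp)
    have ha2 := h2 a (by simp)
    simp only [pvScan, ha1, Bool.false_eq_true, if_false]
    rw [if_neg (by simp [ha2])]
    cases ha : (!(lowered == "") && PySem.Str.startswith (PySem.Str.lower a) pfx) with
    | true =>
      rw [ha] at hfind
      simp only [Option.some.injEq] at hfind
      subst hfind
      rw [if_pos (by simp [hbest])]
      exact pvScan_keep text lowered pfx tl 3 a
        (fun x hx => h1 x (by simp [hx])) (fun x hx _ => h2 x (by simp [hx]))
        (fun x _ h => by omega) (by omega)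
    | false =>
      rw [ha] at hfind
      rw [if_neg (by simp)]
      apply ih (fun x hx => h1 x (by simp [hx])) (fun x hx => h2 x (by simp [hx])) hfind
      split_ifs <;> first | exact hbest | simp [pvBestTier]

-- the first option matching tier 4 wins when no better match exists
theorem pvScan_four (text lowered pfx : String) (l : List String) (o : String)
    (h1 : ∀ x ∈ l, (text == x) = false)
    (h2 : ∀ x ∈ l, (PySem.Str.lower x == lowered) = false)
    (h3 : ∀ x ∈ l, (!(lowered == "") && PySem.Str.startswith (PySem.Str.lower x) pfx) = false)
    (hfind : l.find? (fun x => PySem.Str.isIn (PySem.Str.lower x) lowered || PySem.Str.isIn lowered (PySem.Str.lower x)) = some o) :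
    pvScan text lowered pfx none l = some o := by
  induction l with
  | nil => simp at hfind
  | cons a tl ih =>
    simp only [List.find?] at hfind
    have ha1 := h1 a (by simp)
    have ha2 := h2 a (by simp)
    have ha3 := h3 a (by simp)
    simp only [pvScan, ha1, Bool.false_eq_true, if_false]
    rw [if_neg (by simp [pvBestTier, ha2]), if_neg (by rw [ha3]; simp)]
    cases ha : (PySem.Str.isIn (PySem.Str.lower a) lowered || PySem.Str.isIn lowered (PySem.Str.lower a)) with
    | true =>
      rw [ha] at hfind
      simp only [Option.some.injEq] at hfind
      subst hfind
      rw [if_pos (by simp [pvBestTier])]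
      exact pvScan_keep text lowered pfx tl 4 a
        (fun x hx => h1 x (by simp [hx])) (fun x hx _ => h2 x (by simp [hx]))
        (fun x hx _ => h3 x (by simp [hx])) (by omega)
    | false =>
      rw [ha] at hfind
      rw [if_neg (by simp)]
      exact ih (fun x hx => h1 x (by simp [hx])) (fun x hx => h2 x (by simp [hx]))
        (fun x hx => h3 x (by simp [hx])) hfind

-- nothing matches: the accumulator never changes
theorem pvScan_none (text lowered pfx : String) (l : List String)
    (h1 : ∀ x ∈ l, (text == x) = false)
    (h2 : ∀ x ∈ l, (PySem.Str.lower x == lowered) = false)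
    (h3 : ∀ x ∈ l, (!(lowered == "") && PySem.Str.startswith (PySem.Str.lower x) pfx) = false)
    (h4 : ∀ x ∈ l, (PySem.Str.isIn (PySem.Str.lower x) lowered || PySem.Str.isIn lowered (PySem.Str.lower x)) = false) :
    pvScan text lowered pfx none l = none := by
  induction l with
  | nil => rfl
  | cons a tl ih =>
    simp only [pvScan, h1 a (by simp), Bool.false_eq_true, if_false]
    rw [if_neg (by rw [h2 a (by simp)]; simp), if_neg (by rw [h3 a (by simp)]; simp),
        if_neg (by rw [h4 a (by simp)]; simp)]
    exact ih (fun x hx => h1 x (by simp [hx])) (fun x hx => h2 x (by simp [hx]))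
      (fun x hx => h3 x (by simp [hx])) (fun x hx => h4 x (by simp [hx]))

-- ===== VERDICT (by name: the statement is the Claim_ definition above) =====
theorem match_to_option_spec : Claim_equal_match_to_option := by
  intro raw options _
  unfold Spec_match_to_option match_to_option match_to_option_alt
  set text := PySem.Str.strip (if raw == "" then "" else raw) with htext
  by_cases hempty : options.isEmpty
  · simp [hempty]
  · simp only [hempty]
    set lowered := PySem.Str.lower text with hlow
    set pfx := PySem.Str.slice lowered none (some 30) with hpfx
    clear_value text lowered pfx
    cases h1 : options.find? (fun opt => text == opt) with
    | some o => rw [pvScan_exact text lowered pfx options o h1 none]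
    | none =>
      have hq1 : ∀ x ∈ options, (text == x) = false := by
        have := List.find?_eq_none.mp h1
        intro x hx; simpa using this x hx
      cases h2 : options.find? (fun opt => PySem.Str.lower opt == lowered) with
      | some o =>
        rw [pvScan_two text lowered pfx options o hq1 h2 none (by simp [pvBestTier])]
      | none =>
        have hq2 : ∀ x ∈ options, (PySem.Str.lower x == lowered) = false := by
          have := List.find?_eq_none.mp h2
          intro x hx; simpa using this x hx
        -- A's third-pass condition, re-oriented by Bool.and_comm
        have h3c : options.find? (fun opt =>
            PySem.Str.startswith (PySem.Str.lower opt) pfx && !(lowered == ""))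
          = options.find? (fun opt =>
            !(lowered == "") && PySem.Str.startswith (PySem.Str.lower opt) pfx) :=
          find?_congr_mem _ _ options (fun x _ => Bool.and_comm _ _)
        rw [h3c]
        cases h3 : options.find? (fun opt =>
            !(lowered == "") && PySem.Str.startswith (PySem.Str.lower opt) pfx) with
        | some o =>
          rw [pvScan_three text lowered pfx options o hq1 hq2 h3 none (by simp [pvBestTier])]
        | none =>
          have hq3 : ∀ x ∈ options,
              (!(lowered == "") && PySem.Str.startswith (PySem.Str.lower x) pfx) = false := by
            have := List.find?_eq_none.mp h3
            intro x hx; simpa using this x hx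
          cases h4 : options.find? (fun opt =>
              PySem.Str.isIn (PySem.Str.lower opt) lowered || PySem.Str.isIn lowered (PySem.Str.lower opt)) with
          | some o => rw [pvScan_four text lowered pfx options o hq1 hq2 hq3 h4]
          | none =>
            have hq4 : ∀ x ∈ options,
                (PySem.Str.isIn (PySem.Str.lower x) lowered || PySem.Str.isIn lowered (PySem.Str.lower x)) = false := by
              have := List.find?_eq_none.mp h4
              intro x hx; simpa using this x hx
            rw [pvScan_none text lowered pfx options hq1 hq2 hq3 hq4]
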